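-- pv_equiv track=rewrite | github.com/VibhinnS/DSA- | cf/script2.py | f_value
-- ===== SOURCE A (Python) =====
-- def f_value(s, l, r, palin):
--     n = len(s)
--     result = 0
--     for i in range(l, r + 1):
--         for j in range(i, r + 1):
--             if not palin[j - i + 1]:
--                 result += j - i + 1
--                 break
--     return result
-- ===== SOURCE B (Python) =====
-- def f_value(s, l, r, palin):
--     if l > r:
--         return 0
--     L0 = None
--     for k in range(1, len(palin)):
--         if not palin[k]:
--             L0 = k
--             break
--     if L0 is None:
--         return 0
--     count = r - l + 2 - L0
--     return L0 * count if count > 0 else 0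
-- ===== Notes on version B (the rewrite author's own statement) =====
-- stated objective: alternative
-- what changed: B replaces A's nested per-start-index scans by one left-to-right scan finding the smallest non-palindromic length L0, then returns L0 times the count of eligible start indices by closed form (O(r-l+len(palin)) worst case vs A's O((r-l)^2); a timing run did not consistently confirm a speed-up on random inputs, where A also exits early).
import Mathlib
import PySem

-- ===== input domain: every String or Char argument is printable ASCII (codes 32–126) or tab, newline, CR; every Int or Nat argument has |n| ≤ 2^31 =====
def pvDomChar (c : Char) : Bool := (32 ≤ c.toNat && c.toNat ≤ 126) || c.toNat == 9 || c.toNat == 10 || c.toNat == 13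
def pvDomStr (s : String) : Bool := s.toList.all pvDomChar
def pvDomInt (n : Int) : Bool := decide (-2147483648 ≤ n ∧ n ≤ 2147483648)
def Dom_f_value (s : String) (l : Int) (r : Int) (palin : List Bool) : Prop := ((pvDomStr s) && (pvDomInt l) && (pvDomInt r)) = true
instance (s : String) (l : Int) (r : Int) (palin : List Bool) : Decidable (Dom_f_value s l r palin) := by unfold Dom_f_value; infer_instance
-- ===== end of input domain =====

-- B: one scan for the smallest non-palindromic length L0, then a closed-form count instead of A's nested per-index scans.

-- ===== PORT A =====
-- inner 'for j in range(i, r+1)' with break: returns the first j-i+1 with 'not palin[j-i+1]', else 0.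
-- palin[j-i+1] uses a nonnegative index; out-of-range (IndexError in Python) is excluded by Pre_,
-- the port continues with default 'true' there (value irrelevant inside Pre_).
def f_value_innerA (palin : List Bool) (i : Int) : List Int → Int
  | [] => 0
  | j :: js =>
    if ((PySem.List.pyGet? palin (j - i + 1)).getD true) = false then j - i + 1
    else f_value_innerA palin i js

def f_value (s : String) (l : Int) (r : Int) (palin : List Bool) : Int :=
  let _n : Int := PySem.Str.len s
  (PySem.List.pyRange l (r + 1) 1).foldl
    (fun result i => result + f_value_innerA palin i (PySem.List.pyRange i (r + 1) 1)) 0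

-- ===== PORT B =====
-- 'for k in range(1, len(palin)): if not palin[k]: L0 = k; break' — a scan of palin[1:] carrying index k.
def f_value_firstFalse : List Bool → Int → Option Int
  | [], _ => none
  | b :: bs, k => if b = false then some k else f_value_firstFalse bs (k + 1)

def f_value_alt (s : String) (l : Int) (r : Int) (palin : List Bool) : Int :=
  if l > r then 0
  else
    match f_value_firstFalse (palin.drop 1) 1 with
    | none => 0
    | some L0 =>
      let count := r - l + 2 - L0
      if count > 0 then L0 * count else 0

-- ===== PRECONDITION & SPEC =====
-- Pre_ excludes exactly the inputs on which Python A raises IndexError: l ≤ r while palin has no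
-- entry False at an index ≥ 1 and is too short (len(palin) ≤ r-l+1), so the inner scan runs off the list.
def Pre_f_value (s : String) (l : Int) (r : Int) (palin : List Bool) : Prop :=
  r < l ∨ r - l + 1 < (palin.length : Int) ∨ ∃ b ∈ palin.drop 1, b = false
instance (s : String) (l : Int) (r : Int) (palin : List Bool) : Decidable (Pre_f_value s l r palin) := by
  unfold Pre_f_value; infer_instance

def pvWitness_f_value : String × Int × Int × List Bool := ("", 0, 1, [true, false, true])

def Spec_f_value (s : String) (l : Int) (r : Int) (palin : List Bool) (out : Int) : Prop := out = f_value_alt s l r palin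
instance (s : String) (l : Int) (r : Int) (palin : List Bool) (out : Int) : Decidable (Spec_f_value s l r palin out) := by unfold Spec_f_value; infer_instance

-- ===== CLAIM (what is proved, stated in full; the proofs are below) =====
def Claim_equal_f_value : Prop := ∀ (s : String) (l : Int) (r : Int) (palin : List Bool), Dom_f_value s l r palin → Pre_f_value s l r palin → Spec_f_value s l r palin (f_value s l r palin)

-- ===== LEMMAS AND PROOFS =====

-- proof helper: the inner A-scan re-expressed over the original list with an Int index.
def pvH (palin : List Bool) : Nat → Int → Int
  | 0, _ => 0
  | m + 1, q =>
    if ((PySem.List.pyGet? palin q).getD true) = false then q else pvH palin m (q + 1)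

theorem f_value_firstFalse_ge (bs : List Bool) (k L : Int)
    (h : f_value_firstFalse bs k = some L) : k ≤ L := by
  induction bs generalizing k with
  | nil => simp [f_value_firstFalse] at h
  | cons b bs ih =>
    simp only [f_value_firstFalse] at h
    split at h
    · injection h with h'; omega
    · have := ih (k + 1) h; omega

theorem f_value_innerA_pvH (palin : List Bool) (i : Int) :
    ∀ (m : Nat) (j : Int),
      f_value_innerA palin i (PySem.List.pyRange j (j + (m : Int)) 1) = pvH palin m (j - i + 1) := by
  intro m
  induction m with
  | zero =>
    intro j
    rw [PySem.List.pyRange_one_eq_nil (by omega)]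
    rfl
  | succ m ih =>
    intro j
    rw [PySem.List.pyRange_one_cons (by push_cast; omega)]
    simp only [f_value_innerA, pvH]
    split
    · rfl
    · have h := ih (j + 1)
      have e : j + ((m : Int) + 1) = j + 1 + (m : Int) := by ring
      push_cast
      rw [e, h]
      congr 1
      omega

theorem pvH_firstFalse (palin : List Bool) :
    ∀ (m : Nat) (q : Int), 0 ≤ q →
      pvH palin m q =
        match f_value_firstFalse (palin.drop q.toNat) q with
        | none => 0
        | some L => if L < q + (m : Int) then L else 0 := by
  intro m
  induction m with
  | zero =>
    intro q hq
    cases hF : f_value_firstFalse (palin.drop q.toNat) q with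
    | none => rfl
    | some L =>
      have := f_value_firstFalse_ge _ _ _ hF
      simp only [pvH]
      rw [if_neg (by push_cast; omega)]
  | succ m ih =>
    intro q hq
    have hget : PySem.List.pyGet? palin q = (palin.drop q.toNat).head? := by
      obtain ⟨n, rfl⟩ : ∃ n : Nat, q = (n : Int) := ⟨q.toNat, by omega⟩
      rw [PySem.List.pyGet?_natCast, Int.toNat_natCast, ← List.head?_drop]
    cases hd : palin.drop q.toNat with
    | nil =>
      have hd' : palin.drop (q + 1).toNat = [] := by
        have : palin.length ≤ q.toNat := by
          by_contra hlt
          exact absurd hd (by simp [List.drop_eq_nil_iff]; omega)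
        simp [List.drop_eq_nil_iff]; omega
      simp only [pvH, hget, hd]
      rw [if_neg (by simp)]
      rw [ih (q + 1) (by omega), hd']
      rfl
    | cons b bs =>
      have hd' : palin.drop (q + 1).toNat = bs := by
        have : (q + 1).toNat = q.toNat + 1 := by omega
        rw [this, ← List.drop_drop]
        simp [hd]
      simp only [pvH, hget, hd, List.head?_cons, Option.getD_some]
      cases b with
      | false =>
        rw [if_pos rfl]
        show q = match f_value_firstFalse (false :: bs) q with
          | none => 0
          | some L => if L < q + ((m + 1 : Nat) : Int) then L else 0
        rw [show f_value_firstFalse (false :: bs) q = some q from by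
          simp [f_value_firstFalse]]
        show q = if q < q + ((m + 1 : Nat) : Int) then q else 0
        rw [if_pos (by push_cast; omega)]
      | true =>
        rw [if_neg (by simp)]
        rw [ih (q + 1) (by omega), hd']
        show _ = match f_value_firstFalse (true :: bs) q with
          | none => 0
          | some L => if L < q + ((m + 1 : Nat) : Int) then L else 0
        rw [show f_value_firstFalse (true :: bs) q = f_value_firstFalse bs (q + 1) from by
          simp [f_value_firstFalse]]
        cases hF : f_value_firstFalse bs (q + 1) with
        | none => rfl
        | some L =>
          simp only []
          congr 1
          exact propext (by omega)

theorem f_value_innerA_eq (palin : List Bool) (i r : Int) (h : i ≤ r + 1) :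
    f_value_innerA palin i (PySem.List.pyRange i (r + 1) 1) =
      match f_value_firstFalse (palin.drop 1) 1 with
      | none => 0
      | some L0 => if L0 ≤ r + 1 - i then L0 else 0 := by
  have hm : r + 1 = i + ((r + 1 - i).toNat : Int) := by omega
  rw [hm, f_value_innerA_pvH palin i (r + 1 - i).toNat i]
  have : i - i + 1 = (1 : Int) := by ring
  rw [this, pvH_firstFalse palin _ 1 (by norm_num)]
  have h1 : (1 : Int).toNat = 1 := rfl
  rw [h1]
  cases hF : f_value_firstFalse (palin.drop 1) 1 with
  | none => rfl
  | some L =>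
    simp only []
    congr 1
    exact propext (by omega)

theorem f_value_sum (r L0 : Int) (hL0 : 1 ≤ L0) :
    ∀ (m : Nat) (l : Int), r + 1 - l ≤ (m : Int) →
      ((PySem.List.pyRange l (r + 1) 1).map
        (fun i => if L0 ≤ r + 1 - i then L0 else 0)).sum =
      (if r - l + 2 - L0 > 0 then L0 * (r - l + 2 - L0) else 0) := by
  intro m
  induction m with
  | zero =>
    intro l hl
    rw [PySem.List.pyRange_one_eq_nil (by push_cast at hl; omega)]
    simp only [List.map_nil, List.sum_nil]
    rw [if_neg (by push_cast at hl; omega)]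
  | succ m ih
  =>
    intro l hl
    by_cases hlr : r + 1 ≤ l
    · rw [PySem.List.pyRange_one_eq_nil hlr]
      simp only [List.map_nil, List.sum_nil]
      rw [if_neg (by omega)]
    · rw [PySem.List.pyRange_one_cons (by omega)]
      simp only [List.map_cons, List.sum_cons]
      rw [ih (l + 1) (by push_cast at hl; omega)]
      by_cases h1 : L0 ≤ r + 1 - l
      · rw [if_pos h1]
        by_cases h2 : r - (l + 1) + 2 - L0 > 0
        · rw [if_pos h2, if_pos (by omega)]; ring
        · rw [if_neg h2, if_pos (by omega)]
          have e : r - l + 2 - L0 = 1 := by omega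
          rw [e]; ring
      · rw [if_neg h1, if_neg (by omega), if_neg (by omega)]
        ring

-- ===== VERDICT (by name: the statement is the Claim_ definition above) =====
theorem f_value_spec : Claim_equal_f_value := by
  intro s l r palin _ _
  unfold Spec_f_value f_value f_value_alt
  simp only []
  by_cases hlr : l > r
  · rw [PySem.List.pyRange_one_eq_nil (by omega), if_pos hlr]
    rfl
  · rw [if_neg hlr]
    have key : (PySem.List.pyRange l (r + 1) 1).foldl
        (fun result i => result + f_value_innerA palin i (PySem.List.pyRange i (r + 1) 1)) 0 =
        (PySem.List.pyRange l (r + 1) 1).foldl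
        (fun result i => result +
          (match f_value_firstFalse (palin.drop 1) 1 with
            | none => 0
            | some L0 => if L0 ≤ r + 1 - i then L0 else 0)) 0 := by
      apply PySem.List.foldl_congr_mem
      intro acc i hi
      have := (PySem.List.mem_pyRange_one).1 hi
      rw [f_value_innerA_eq palin i r (by omega)]
    rw [key]
    cases hF : f_value_firstFalse (palin.drop 1) 1 with
    | none =>
      simp
    | some L0 =>
      have hL0 : 1 ≤ L0 := f_value_firstFalse_ge _ _ _ hF
      simp only []
      rw [PySem.List.foldl_add]
      rw [f_value_sum r L0 hL0 (r + 1 - l).toNat l (by omega)]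
      simp only [zero_add]
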